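-- pv_equiv track=rewrite | github.com/artificial-scientist-lab/PyTheus | pytheus/theusplot.py | remove_unused
-- ===== SOURCE A (Python) =====
-- import  string, itertools
--
-- def remove_unused(lst1, lst2):
--     lst3 = []
--     lst1 = list(itertools.permutations(lst1, 2))
--     for ii in lst2:
--         for jj in lst1:
--             if ii == jj:
--                 lst3.append(ii)
--     lst2 = [x for x in lst2 if  x not in lst3]
--     return lst2
-- ===== SOURCE B (Python) =====
-- from collections import Counter
--
-- def remove_unused(lst1, lst2):
--     # (a, b) is a 2-permutation of lst1 iff a and b both occur in lst1
--     # and, when a == b, that value occurs at least twice.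
--     cnt = Counter(lst1)
--     return [x for x in lst2
--             if not (cnt[x[0]] > 0 and cnt[x[1]] > 0
--                     and (x[0] != x[1] or cnt[x[0]] >= 2))]
-- ===== Notes on version B (the rewrite author's own statement) =====
-- stated objective: faster
-- what changed: Instead of materialising all ordered pairs itertools.permutations(lst1, 2) and matching lst2 against them with nested scans plus a final 'not in' pass, B builds one Counter of lst1 and keeps each lst2 element by a constant-time occurrence test (both components occur, and at least twice if equal).
import Mathlib
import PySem

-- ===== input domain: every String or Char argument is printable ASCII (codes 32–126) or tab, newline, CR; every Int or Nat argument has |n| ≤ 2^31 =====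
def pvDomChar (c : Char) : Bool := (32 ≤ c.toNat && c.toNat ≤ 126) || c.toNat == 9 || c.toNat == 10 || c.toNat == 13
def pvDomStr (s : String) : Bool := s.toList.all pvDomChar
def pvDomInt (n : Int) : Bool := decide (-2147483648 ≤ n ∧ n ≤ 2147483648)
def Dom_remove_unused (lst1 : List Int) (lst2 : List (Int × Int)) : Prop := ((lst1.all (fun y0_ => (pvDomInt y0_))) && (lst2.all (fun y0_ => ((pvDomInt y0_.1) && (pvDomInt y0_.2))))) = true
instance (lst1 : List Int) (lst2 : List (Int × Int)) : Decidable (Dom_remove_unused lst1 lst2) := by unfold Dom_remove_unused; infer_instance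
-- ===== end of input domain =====

-- B replaces A's enumeration of all ordered pairs (itertools.permutations(lst1, 2))
-- and its nested matching loops by one Counter of lst1 and a single filtering pass
-- over lst2 (objective: faster).

-- ===== PORT A =====
-- itertools.permutations(lst1, 2): ordered pairs of entries at distinct indices
def pvPerms2 (l : List Int) : List (Int × Int) :=
  (List.range l.length).flatMap (fun i =>
    (List.range l.length).filterMap (fun j =>
      if i ≠ j then some (l.getD i 0, l.getD j 0) else none))

def remove_unused (lst1 : List Int) (lst2 : List (Int × Int)) : List (Int × Int) :=
  let lst1' := pvPerms2 lst1
  let lst3 := lst2.foldl (fun acc ii =>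
      lst1'.foldl (fun a jj => if ii == jj then a ++ [ii] else a) acc) []
  lst2.filter (fun x => !(lst3.contains x))

-- ===== PORT B =====
def remove_unused_alt (lst1 : List Int) (lst2 : List (Int × Int)) : List (Int × Int) :=
  let cnt := PySem.Dict.counter lst1
  lst2.filter (fun x =>
    !(decide (0 < cnt.getD x.1 0) && decide (0 < cnt.getD x.2 0) &&
      (x.1 != x.2 || decide (2 ≤ cnt.getD x.1 0))))

-- ===== PRECONDITION & SPEC =====
def Spec_remove_unused (lst1 : List Int) (lst2 : List (Int × Int)) (out : List (Int × Int)) : Prop := out = remove_unused_alt lst1 lst2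
instance (lst1 : List Int) (lst2 : List (Int × Int)) (out : List (Int × Int)) : Decidable (Spec_remove_unused lst1 lst2 out) := by unfold Spec_remove_unused; infer_instance

-- ===== CLAIM (what is proved, stated in full; the proofs are below) =====
def Claim_equal_remove_unused : Prop := ∀ (lst1 : List Int) (lst2 : List (Int × Int)), Dom_remove_unused lst1 lst2 → Spec_remove_unused lst1 lst2 (remove_unused lst1 lst2)

-- ===== LEMMAS AND PROOFS =====

-- membership in the permutation list, in index form
theorem mem_pvPerms2_iff (l : List Int) (a b : Int) :
    (a, b) ∈ pvPerms2 l ↔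
      ∃ i j, i < l.length ∧ j < l.length ∧ i ≠ j ∧ l.getD i 0 = a ∧ l.getD j 0 = b := by
  simp only [pvPerms2, List.mem_flatMap, List.mem_filterMap, List.mem_range]
  constructor
  · rintro ⟨i, hi, j, hj, h⟩
    split at h
    · exact ⟨i, j, hi, hj, by omega, by simpa using congrArg Prod.fst (Option.some.inj h),
        by simpa using congrArg Prod.snd (Option.some.inj h)⟩
    · cases h
  · rintro ⟨i, j, hi, hj, hne, ha, hb⟩
    exact ⟨i, hi, j, hj, by rw [if_pos hne, ha, hb]⟩

-- index characterisation of a 2-permutation of l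
theorem pair_char (l : List Int) (a b : Int) :
    (∃ i j, i < l.length ∧ j < l.length ∧ i ≠ j ∧ l.getD i 0 = a ∧ l.getD j 0 = b) ↔
      (a ∈ l ∧ b ∈ l ∧ (a ≠ b ∨ 2 ≤ l.count a)) := by
  constructor
  · rintro ⟨i, j, hi, hj, hne, ha, hb⟩
    rw [List.getD_eq_getElem l 0 hi] at ha
    rw [List.getD_eq_getElem l 0 hj] at hb
    refine ⟨ha ▸ List.getElem_mem hi, hb ▸ List.getElem_mem hj, ?_⟩
    by_cases hab : a = b
    · right
      rw [← List.duplicate_iff_two_le_count, List.duplicate_iff_exists_distinct_get]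
      rcases Nat.lt_or_ge i j with h | h
      · exact ⟨⟨i, hi⟩, ⟨j, hj⟩, h, by simpa using ha.symm,
          by simpa using (hab ▸ hb.symm : a = l[j])⟩
      · have hji : j < i := by omega
        exact ⟨⟨j, hj⟩, ⟨i, hi⟩, hji, by simpa using (hab ▸ hb.symm : a = l[j]),
          by simpa using ha.symm⟩
    · left; exact hab
  · rintro ⟨ha, hb, hcase⟩
    rcases hcase with hab | hcnt
    · obtain ⟨i, hi, hia⟩ := List.getElem_of_mem ha
      obtain ⟨j, hj, hjb⟩ := List.getElem_of_mem hb
      refine ⟨i, j, hi, hj, ?_, by rw [List.getD_eq_getElem l 0 hi, hia],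
        by rw [List.getD_eq_getElem l 0 hj, hjb]⟩
      rintro rfl; exact hab (hia ▸ hjb ▸ rfl)
    · rw [← List.duplicate_iff_two_le_count, List.duplicate_iff_exists_distinct_get] at hcnt
      obtain ⟨n, m, hnm, hn, hm⟩ := hcnt
      obtain ⟨j, hj, hjb⟩ := List.getElem_of_mem hb
      have hnm' : (n : ℕ) < (m : ℕ) := hnm
      by_cases hjn : (n : ℕ) = j
      · refine ⟨m, j, m.isLt, hj, by omega,
          by rw [List.getD_eq_getElem l 0 m.isLt]; exact hm.symm,
          by rw [List.getD_eq_getElem l 0 hj, hjb]⟩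
      · refine ⟨n, j, n.isLt, hj, hjn,
          by rw [List.getD_eq_getElem l 0 n.isLt]; exact hn.symm,
          by rw [List.getD_eq_getElem l 0 hj, hjb]⟩

-- the collection loop builds exactly the lst2-elements that occur in the permutation list
theorem mem_lst3 (ps : List (Int × Int)) (lst2 : List (Int × Int)) (x : Int × Int) :
    x ∈ lst2.foldl (fun acc ii =>
        ps.foldl (fun a jj => if ii == jj then a ++ [ii] else a) acc) [] ↔
      x ∈ lst2 ∧ x ∈ ps := by
  rw [PySem.List.foldl_congr_mem lst2 _
    (fun acc ii => acc ++ (ps.filter (fun jj => ii == jj)).map (fun _ => ii)) []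
    (fun acc ii _ => PySem.List.foldl_append_if _ _ _ _),
    PySem.List.foldl_append_eq_flatMap]
  simp only [List.nil_append, List.mem_flatMap, List.mem_map, List.mem_filter]
  constructor
  · rintro ⟨ii, hii, jj, ⟨hjj, hbe⟩, rfl⟩
    exact ⟨hii, by rw [show ii = jj from beq_iff_eq.mp hbe]; exact hjj⟩
  · rintro ⟨h2, hp⟩
    exact ⟨x, h2, x, ⟨hp, beq_self_eq_true x⟩, rfl⟩

-- ===== VERDICT (by name: the statement is the Claim_ definition above) =====
theorem remove_unused_spec : Claim_equal_remove_unused := by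
  intro lst1 lst2 _
  unfold Spec_remove_unused remove_unused remove_unused_alt
  refine List.filter_congr ?_
  intro x hx
  have hperm := (mem_pvPerms2_iff lst1 x.1 x.2).trans (pair_char lst1 x.1 x.2)
  rw [Prod.mk.eta] at hperm
  congr 1
  rw [Bool.eq_iff_iff]
  rw [List.contains_iff_mem, mem_lst3, hperm]
  simp only [Bool.and_eq_true, decide_eq_true_eq, Bool.or_eq_true, bne_iff_ne,
    PySem.Dict.getD_counter]
  constructor
  · rintro ⟨-, h1, h2, h3⟩
    refine ⟨⟨?_, ?_⟩, ?_⟩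
    · exact_mod_cast List.count_pos_iff.mpr h1
    · exact_mod_cast List.count_pos_iff.mpr h2
    · rcases h3 with h | h
      · exact Or.inl h
      · exact Or.inr (by exact_mod_cast h)
  · rintro ⟨⟨c1, c2⟩, hc⟩
    refine ⟨hx, ?_, ?_, ?_⟩
    · exact List.count_pos_iff.mp (by exact_mod_cast c1)
    · exact List.count_pos_iff.mp (by exact_mod_cast c2)
    · rcases hc with h | h
      · exact Or.inl h
      · exact Or.inr (by exact_mod_cast h)
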